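-- pv_equiv track=rewrite | github.com/marcins21/small_algorythimic_projects | birthday_paradox.py | find_same_birthdays
-- ===== SOURCE A (Python) =====
-- def find_same_birthdays(birthdays:list):
--     same_birthday = []
--     result_list = []
--     for i in range(len(birthdays)):
--
--         #checking if birthday repeats
--         tmp = birthdays.pop(0)
--         if tmp in birthdays:
--             same_birthday.append(tmp)
--             #if birthday repeats then add '100' to another list
--             result_list.append(100)
--
--         else:
--             result_list.append(0)
--
--     return result_list
-- ===== SOURCE B (Python) =====
-- def find_same_birthdays(birthdays: list):
--     # One reverse pass with a seen-set, building the result back-to-front (O(n) expected).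
--     # Unlike A, this does not mutate (empty) the input list; return value is identical.
--     out = []
--     seen = set()
--     for v in reversed(birthdays):
--         out.append(100 if v in seen else 0)
--         seen.add(v)
--     out.reverse()
--     return out
-- ===== Notes on version B (the rewrite author's own statement) =====
-- stated objective: faster
-- what changed: Replaced the per-element rescan of the remaining list (pop(0) + 'in' on the tail) by a single reverse pass that maintains a seen-set and builds the result back-to-front; B does not mutate the input list.
import Mathlib
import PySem

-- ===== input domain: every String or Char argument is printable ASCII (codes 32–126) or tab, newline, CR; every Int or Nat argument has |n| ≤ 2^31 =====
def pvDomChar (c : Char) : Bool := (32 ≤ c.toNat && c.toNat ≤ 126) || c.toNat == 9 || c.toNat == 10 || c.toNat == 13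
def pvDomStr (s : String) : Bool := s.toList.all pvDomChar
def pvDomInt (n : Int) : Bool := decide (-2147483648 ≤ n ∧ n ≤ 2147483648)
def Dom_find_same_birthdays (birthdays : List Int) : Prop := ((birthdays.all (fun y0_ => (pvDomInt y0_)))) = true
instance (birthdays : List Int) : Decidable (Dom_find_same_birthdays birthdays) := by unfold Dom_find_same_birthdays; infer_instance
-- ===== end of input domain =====

-- B replaces A's quadratic pop(0)+membership-on-the-tail loop by one reverse pass with a
-- seen-set, building the result back-to-front (objective: faster). A empties its input via
-- pop(0), B does not mutate it; the equivalence proved here is about the RETURN value only.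

-- ===== PORT A =====
-- the loop: each iteration pops the head (tmp), tests membership in the remaining list,
-- and appends 100 or 0 to result_list
def findA_loop : List Int → List Int → List Int
  | [], result_list => result_list
  | tmp :: rest, result_list =>
      findA_loop rest (result_list ++ [if rest.contains tmp then 100 else 0])

def find_same_birthdays (birthdays : List Int) : List Int :=
  findA_loop birthdays []

-- ===== PORT B =====
def find_same_birthdays_alt (birthdays : List Int) : List Int :=
  let p := birthdays.reverse.foldl
    (fun (st : List Int × PySem.Set Int) v =>
      (st.1 ++ [if PySem.Set.contains st.2 v then 100 else 0], PySem.Set.add st.2 v))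
    ([], PySem.Set.empty)
  p.1.reverse

-- ===== PRECONDITION & SPEC =====
def Spec_find_same_birthdays (birthdays : List Int) (out : List Int) : Prop := out = find_same_birthdays_alt birthdays
instance (birthdays : List Int) (out : List Int) : Decidable (Spec_find_same_birthdays birthdays out) := by unfold Spec_find_same_birthdays; infer_instance

-- ===== CLAIM (what is proved, stated in full; the proofs are below) =====
def Claim_equal_find_same_birthdays : Prop := ∀ (birthdays : List Int), Dom_find_same_birthdays birthdays → Spec_find_same_birthdays birthdays (find_same_birthdays birthdays)

-- ===== LEMMAS AND PROOFS =====

-- the per-element marks produced by B's fold, starting from seen-set s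
def marks : List Int → PySem.Set Int → List Int
  | [], _ => []
  | v :: vs, s => (if PySem.Set.contains s v then 100 else 0) :: marks vs (PySem.Set.add s v)

theorem foldl_fst_eq_marks (m : List Int) (res : List Int) (s : PySem.Set Int) :
    (m.foldl
      (fun (st : List Int × PySem.Set Int) v =>
        (st.1 ++ [if PySem.Set.contains st.2 v then 100 else 0], PySem.Set.add st.2 v))
      (res, s)).1 = res ++ marks m s := by
  induction m generalizing res s with
  | nil => simp [marks]
  | cons v vs ih =>
      simp only [List.foldl_cons, marks, ih, List.append_assoc, List.singleton_append]

theorem marks_append (a b : List Int) (s : PySem.Set Int) :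
    marks (a ++ b) s = marks a s ++ marks b (PySem.Set.update s a) := by
  induction a generalizing s with
  | nil => rfl
  | cons x xs ih => simp [marks, ih]

theorem contains_update (s : PySem.Set Int) (m : List Int) (x : Int) :
    PySem.Set.contains (PySem.Set.update s m) x = (m.contains x || PySem.Set.contains s x) := by
  simp only [PySem.Set.contains_eq_listContains, List.contains_eq_mem]
  rw [Bool.eq_iff_iff]
  simp [PySem.Set.mem_update, or_comm]

-- A's loop as seen by the proof: head test against the tail, plus a carried seen-set
def tailMarks : List Int → PySem.Set Int → List Int
  | [], _ => []
  | x :: xs, s => (if (xs.contains x || PySem.Set.contains s x) then 100 else 0) :: tailMarks xs s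

-- B's reverse-pass marks, read front-to-back, agree with the tail-membership test
theorem marks_reverse (l : List Int) (s : PySem.Set Int) :
    (marks l.reverse s).reverse = tailMarks l s := by
  induction l generalizing s with
  | nil => rfl
  | cons x xs ih =>
      rw [List.reverse_cons, marks_append]
      simp [marks, tailMarks, contains_update, ih, or_comm]

theorem findA_loop_eq (l res : List Int) :
    findA_loop l res = res ++ tailMarks l PySem.Set.empty := by
  induction l generalizing res with
  | nil => simp [findA_loop, tailMarks]
  | cons x xs ih => simp [findA_loop, tailMarks, ih]

-- ===== VERDICT (by name: the statement is the Claim_ definition above) =====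
theorem find_same_birthdays_spec : Claim_equal_find_same_birthdays := by
  intro birthdays _
  show find_same_birthdays birthdays = find_same_birthdays_alt birthdays
  rw [find_same_birthdays, find_same_birthdays_alt]
  simp only [foldl_fst_eq_marks, List.nil_append]
  rw [marks_reverse, findA_loop_eq, List.nil_append]
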